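-- pv_equiv track=rewrite | github.com/tanhongze/pyvmodule | pyvmodule/calculations.py | bitwise_count_one
-- ===== SOURCE A (Python) =====
-- def bitwise_count_one(expr):
--     x = int(expr)
--     n = len(expr)
--     retval = 0
--     for i in range(n):
--         if (x&(1<<i))!=0:
--             retval+=1
--     return retval
-- ===== SOURCE B (Python) =====
-- def bitwise_count_one(expr):
--     # Mask to the low len(expr) bits, then count with Kernighan's loop:
--     # each iteration clears the lowest set bit.
--     m = int(expr) & ((1 << len(expr)) - 1)
--     c = 0
--     while m:
--         m &= m - 1
--         c += 1
--     return c
-- ===== Notes on version B (the rewrite author's own statement) =====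
-- stated objective: alternative
-- what changed: Instead of testing every bit position i in range(len(expr)) against x&(1<<i), B masks x to the low len(expr) bits once and counts with Brian Kernighan's loop (m &= m-1), iterating once per set bit.
import Mathlib
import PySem

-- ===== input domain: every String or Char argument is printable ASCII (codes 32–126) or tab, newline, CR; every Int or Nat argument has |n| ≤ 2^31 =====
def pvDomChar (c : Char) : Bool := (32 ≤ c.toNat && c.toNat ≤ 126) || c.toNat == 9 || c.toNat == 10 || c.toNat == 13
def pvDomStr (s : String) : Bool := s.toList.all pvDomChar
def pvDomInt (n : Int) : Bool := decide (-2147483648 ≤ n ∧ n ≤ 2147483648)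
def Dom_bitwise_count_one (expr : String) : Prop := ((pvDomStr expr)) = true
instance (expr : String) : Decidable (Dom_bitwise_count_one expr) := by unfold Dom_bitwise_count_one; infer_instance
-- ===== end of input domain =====

-- B masks int(expr) to the low len(expr) bits once and counts set bits with Kernighan's
-- m &= m-1 loop instead of testing every bit position (alternative algorithm, same result).

-- ===== PORT A =====
-- A: x = int(expr); n = len(expr); for i in range(n): if (x & (1<<i)) != 0: retval += 1
def bitwise_count_one (expr : String) : Int :=
  match PySem.Int.ofStr? expr with
  | none => 0   -- int(expr) raises ValueError here; excluded by Pre_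
  | some x =>
    (PySem.List.pyRange 0 (PySem.Str.len expr) 1).foldl
      (fun retval i =>
        -- i ranges over range(n) so 0 ≤ i and i.toNat is exactly Python's i
        if PySem.Int.band x ((1 : Int) <<< i.toNat) ≠ 0 then retval + 1 else retval) 0

-- ===== PORT B =====
-- termination of the Kernighan loop: m &= m-1 strictly decreases a nonzero m
theorem pvKernDec (m : Nat) (h : ¬ m = 0) : m &&& (m - 1) < m :=
  lt_of_le_of_lt Nat.and_le_right (by omega)

-- B's while loop: while m: m &= m - 1; c += 1
def pvKern (m : Nat) (c : Int) : Int :=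
  if h : m = 0 then c else pvKern (m &&& (m - 1)) (c + 1)
  termination_by m
  decreasing_by exact pvKernDec m h

def bitwise_count_one_alt (expr : String) : Int :=
  match PySem.Int.ofStr? expr with
  | none => 0   -- int(expr) raises ValueError here; excluded by Pre_
  | some x =>
    -- m = x & ((1 << len(expr)) - 1) is nonnegative, so .toNat is exact
    pvKern (PySem.Int.band x (((1 : Int) <<< (PySem.Str.len expr).toNat) - 1)).toNat 0

-- ===== PRECONDITION & SPEC =====
-- Pre_ excludes exactly the strings on which int(expr) raises ValueError (both A and B raise there).
def Pre_bitwise_count_one (expr : String) : Prop := (PySem.Int.ofStr? expr).isSome = true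
instance (expr : String) : Decidable (Pre_bitwise_count_one expr) := by
  unfold Pre_bitwise_count_one; infer_instance

def pvWitness_bitwise_count_one : String := "-12"

def Spec_bitwise_count_one (expr : String) (out : Int) : Prop := out = bitwise_count_one_alt expr
instance (expr : String) (out : Int) : Decidable (Spec_bitwise_count_one expr out) := by
  unfold Spec_bitwise_count_one; infer_instance

-- ===== CLAIM (what is proved, stated in full; the proofs are below) =====
def Claim_equal_bitwise_count_one : Prop := ∀ (expr : String), Dom_bitwise_count_one expr → Pre_bitwise_count_one expr → Spec_bitwise_count_one expr (bitwise_count_one expr)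

-- ===== LEMMAS AND PROOFS =====

-- popcount spec, via PySem's kernel-transparent bit_count
def pvPc (m : Nat) : Nat := PySem.Int.bitCount (m : Int)

theorem pvPc_zero : pvPc 0 = 0 := by decide

theorem pvPc_two_mul (a : Nat) : pvPc (2 * a) = pvPc a := by
  rcases Nat.eq_zero_or_pos a with h | h
  · subst h; rfl
  · have := PySem.Int.bitCount_natCast (m := 2 * a) (by omega)
    unfold pvPc
    rw [this, Nat.mul_mod_right, Nat.mul_div_cancel_left _ (by norm_num)]
    simp

theorem pvPc_two_mul_add_one (a : Nat) : pvPc (2 * a + 1) = pvPc a + 1 := by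
  have := PySem.Int.bitCount_natCast (m := 2 * a + 1) (by omega)
  unfold pvPc
  rw [this]
  have h1 : (2 * a + 1) % 2 = 1 := by omega
  have h2 : (2 * a + 1) / 2 = a := by omega
  rw [h1, h2]; omega

theorem pvLand_odd_even (a : Nat) : (2 * a + 1) &&& (2 * a) = 2 * a := by
  apply Nat.eq_of_testBit_eq
  intro i
  cases i with
  | zero => simp [Nat.testBit_zero, Nat.mul_mod_right]
  | succ i =>
      have h1 : (2 * a + 1) / 2 = a := by omega
      have h2 : (2 * a) / 2 = a := by omega
      simp only [Nat.testBit_land]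
      simp only [Nat.testBit_succ, h1, h2, Bool.and_self]

theorem pvLand_even_odd (a b : Nat) : (2 * a) &&& (2 * b + 1) = 2 * (a &&& b) := by
  apply Nat.eq_of_testBit_eq
  intro i
  cases i with
  | zero => simp [Nat.testBit_zero, Nat.mul_mod_right]
  | succ i =>
      have h1 : (2 * a) / 2 = a := by omega
      have h2 : (2 * b + 1) / 2 = b := by omega
      have h3 : (2 * (a &&& b)) / 2 = a &&& b := by omega
      simp only [Nat.testBit_land]
      simp only [Nat.testBit_succ, h1, h2, h3]
      simp

-- clearing the lowest set bit removes exactly one 1-bit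
theorem pvPc_land_pred : ∀ m : Nat, m ≠ 0 → pvPc (m &&& (m - 1)) + 1 = pvPc m := by
  intro m
  induction m using Nat.strong_induction_on with
  | _ m ih =>
    intro hm
    rcases Nat.mod_two_eq_zero_or_one m with h2 | h2
    · -- even: m = 2a with a ≠ 0
      obtain ⟨a, rfl⟩ : ∃ a, m = 2 * a := ⟨m / 2, by omega⟩
      have ha : a ≠ 0 := by omega
      have hsub : 2 * a - 1 = 2 * (a - 1) + 1 := by omega
      rw [hsub, pvLand_even_odd, pvPc_two_mul, pvPc_two_mul]
      exact ih a (by omega) ha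
    · -- odd: m = 2a + 1
      obtain ⟨a, rfl⟩ : ∃ a, m = 2 * a + 1 := ⟨m / 2, by omega⟩
      have hsub : 2 * a + 1 - 1 = 2 * a := by omega
      rw [hsub, pvLand_odd_even, pvPc_two_mul, pvPc_two_mul_add_one]

theorem pvKern_eq : ∀ (m : Nat) (c : Int), pvKern m c = c + (pvPc m : Int) := by
  intro m
  induction m using Nat.strong_induction_on with
  | _ m ih =>
    intro c
    rw [pvKern]
    split
    · next h => subst h; rw [pvPc_zero]; simp
    · next h =>
        rw [ih (m &&& (m - 1)) (pvKernDec m h) (c + 1)]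
        have := pvPc_land_pred m h
        omega

-- pvPc agrees with counting set bits below any bound
theorem pvPc_eq_cnt : ∀ (n y : Nat), y < 2 ^ n → pvPc y = (List.range n).countP y.testBit := by
  intro n
  induction n with
  | zero => intro y hy; interval_cases y; decide
  | succ n ih =>
      intro y hy
      rcases Nat.eq_zero_or_pos y with h | h
      · subst h
        rw [pvPc_zero]
        symm
        rw [List.countP_eq_zero]
        intro a _
        simp [Nat.zero_testBit]
      · have hrec := PySem.Int.bitCount_natCast (m := y) h
        have hdiv : y / 2 < 2 ^ n := by
          have : 2 ^ (n + 1) = 2 * 2 ^ n := by ring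
          omega
        have hmap : (List.range n).countP (fun i => y.testBit (Nat.succ i))
            = (List.range n).countP (y / 2).testBit := by
          apply List.countP_congr
          intro i _
          simp [Nat.testBit_succ]
        rw [List.range_succ_eq_map, List.countP_cons, List.countP_map]
        unfold pvPc
        rw [hrec]
        show (y % 2) + pvPc (y / 2) = (List.range n).countP (fun i => y.testBit (Nat.succ i)) + _
        rw [hmap, ih (y / 2) hdiv, Nat.testBit_zero]
        rcases Nat.mod_two_eq_zero_or_one y with h2 | h2 <;> simp [h2] <;> omega


theorem pvPc_le (n y : Nat) (hy : y < 2 ^ n) : pvPc y ≤ n := by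
  rw [pvPc_eq_cnt n y hy]
  calc (List.range n).countP y.testBit ≤ (List.range n).length := List.countP_le_length
    _ = n := List.length_range

-- popcount of the n-bit complement
theorem pvPc_compl : ∀ (n y : Nat), y < 2 ^ n → pvPc (2 ^ n - 1 - y) = n - pvPc y := by
  intro n
  induction n with
  | zero => intro y hy; interval_cases y; decide
  | succ n ih =>
      intro y hy
      have hpow : 2 ^ (n + 1) = 2 * 2 ^ n := by ring
      have ha : y / 2 < 2 ^ n := by omega
      have hle : pvPc (y / 2) ≤ n := pvPc_le n (y / 2) ha
      rcases Nat.mod_two_eq_zero_or_one y with h2 | h2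
      · -- y even
        have hy2 : y = 2 * (y / 2) := by omega
        have hz : 2 ^ (n + 1) - 1 - y = 2 * (2 ^ n - 1 - y / 2) + 1 := by omega
        rw [hz, pvPc_two_mul_add_one, ih (y / 2) ha]
        conv_rhs => rw [hy2]
        rw [pvPc_two_mul]
        omega
      · -- y odd
        have hy2 : y = 2 * (y / 2) + 1 := by omega
        have hz : 2 ^ (n + 1) - 1 - y = 2 * (2 ^ n - 1 - y / 2) := by omega
        rw [hz, pvPc_two_mul, ih (y / 2) ha]
        conv_rhs => rw [hy2]
        rw [pvPc_two_mul_add_one]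
        omega

theorem pvFoldA (x : Int) : ∀ (l : List Int) (acc : Int),
    l.foldl (fun retval i =>
        if PySem.Int.band x ((1 : Int) <<< i.toNat) ≠ 0 then retval + 1 else retval) acc
      = acc + ((l.countP
          (fun i => decide (PySem.Int.band x ((1 : Int) <<< i.toNat) ≠ 0)) : Nat) : Int) := by
  intro l
  induction l with
  | nil => intro acc; simp
  | cons hd tl ih =>
      intro acc
      rw [List.foldl_cons, List.countP_cons, ih]
      by_cases h : PySem.Int.band x ((1 : Int) <<< hd.toNat) ≠ 0 <;> simp [h] <;> omega

theorem pvOne_shlN (k : Nat) : (1 : Int) <<< k = ((2 ^ k : Nat) : Int) := by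
  rw [Int.shiftLeft_eq]
  push_cast
  ring

theorem pvCnt_mod (n : Nat) (y : Nat) :
    (List.range n).countP y.testBit = (List.range n).countP (y % 2 ^ n).testBit := by
  apply List.countP_congr
  intro i hi
  have : i < n := List.mem_range.mp hi
  simp [Nat.testBit_mod_two_pow, this]

-- complement counting
theorem pvCountP_not {α : Type} (p : α → Bool) :
    ∀ l : List α, l.countP p + l.countP (fun a => !p a) = l.length := by
  intro l
  induction l with
  | nil => simp
  | cons hd tl ih =>
      rw [List.countP_cons, List.countP_cons, List.length_cons]
      cases h : p hd <;> (simp [h]; omega)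

-- the common core: A's per-position count equals B's Kernighan count of the masked value
theorem pvMain (x : Int) (n : Nat) :
    (((List.range n).countP
        (fun k => decide (PySem.Int.band x ((2 ^ k : Nat) : Int) ≠ 0)) : Nat) : Int)
      = pvKern (PySem.Int.band x (((2 ^ n : Nat) : Int) - 1)).toNat 0 := by
  have hmaskpos : ∀ m : Nat, (0:Int) ≤ ((2 ^ m : Nat) : Int) - 1 := by
    intro m
    have h1 : ((1:Nat) : Int) ≤ ((2 ^ m : Nat) : Int) := by exact_mod_cast Nat.one_le_two_pow
    omega
  have hmtn : (((2 ^ n : Nat) : Int) - 1).toNat = 2 ^ n - 1 := by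
    have h1 : ((1:Nat) : Int) ≤ ((2 ^ n : Nat) : Int) := by exact_mod_cast Nat.one_le_two_pow
    omega
  by_cases hx : (0:Int) ≤ x
  · -- x ≥ 0
    obtain ⟨xt, rfl⟩ : ∃ xt : Nat, x = (xt : Int) := ⟨x.toNat, by omega⟩
    have hA : ∀ k, k ∈ List.range n →
        (decide (PySem.Int.band (xt : Int) ((2 ^ k : Nat) : Int) ≠ 0)) = xt.testBit k := by
      intro k _
      rw [PySem.Int.band_natCast, Nat.and_two_pow]
      have hp : (0:Nat) < 2 ^ k := Nat.two_pow_pos k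
      cases h : xt.testBit k <;> simp [h, hp.ne']
    rw [List.countP_congr (fun k hk => by rw [hA k hk]), pvCnt_mod]
    have hmask : PySem.Int.band (xt : Int) (((2 ^ n : Nat) : Int) - 1)
        = ((xt % 2 ^ n : Nat) : Int) := by
      have h1 : ((2 ^ n : Nat) : Int) - 1 = (((2 ^ n - 1 : Nat)) : Int) := by
        have : (1:Nat) ≤ 2 ^ n := Nat.one_le_two_pow
        omega
      rw [h1, PySem.Int.band_natCast, Nat.and_two_pow_sub_one_eq_mod]
    rw [hmask, pvKern_eq]
    have hlt : xt % 2 ^ n < 2 ^ n := Nat.mod_lt _ (Nat.two_pow_pos n)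
    rw [Int.toNat_natCast, pvPc_eq_cnt n _ hlt]
    simp
  · -- x < 0 : write kk = -x-1 ≥ 0, use band's definition on a negative left argument
    set kk : Nat := (-x - 1).toNat with hkk
    have hband : ∀ b : Int, 0 ≤ b →
        PySem.Int.band x b = ((b.toNat - (b.toNat &&& kk) : Nat) : Int) := by
      intro b hb
      unfold PySem.Int.band
      rw [if_neg hx, if_pos hb]
    have hA : ∀ k, k ∈ List.range n →
        (decide (PySem.Int.band x ((2 ^ k : Nat) : Int) ≠ 0)) = !kk.testBit k := by
      intro k _
      rw [hband _ (by positivity), Int.toNat_natCast, Nat.two_pow_and]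
      have hp : (0:Nat) < 2 ^ k := Nat.two_pow_pos k
      cases h : kk.testBit k <;> simp [h, hp.ne']
    rw [List.countP_congr (fun k hk => by rw [hA k hk])]
    have hlt : kk % 2 ^ n < 2 ^ n := Nat.mod_lt _ (Nat.two_pow_pos n)
    -- B side
    have hmask : PySem.Int.band x (((2 ^ n : Nat) : Int) - 1)
        = ((2 ^ n - 1 - kk % 2 ^ n : Nat) : Int) := by
      rw [hband _ (hmaskpos n), hmtn, Nat.land_comm, Nat.and_two_pow_sub_one_eq_mod]
    rw [hmask, pvKern_eq, Int.toNat_natCast, pvPc_compl n _ hlt]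
    -- A side: count of unset bits below n
    have hcnt : (List.range n).countP (fun k => !kk.testBit k)
        = n - (List.range n).countP kk.testBit := by
      have := pvCountP_not kk.testBit (List.range n)
      rw [List.length_range] at this
      omega
    rw [hcnt, pvCnt_mod, ← pvPc_eq_cnt n _ hlt]
    simp

theorem pvLen_eq (expr : String) : PySem.Str.len expr = ((expr.toList.length : Nat) : Int) := rfl

-- ===== VERDICT (by name: the statement is the Claim_ definition above) =====
theorem bitwise_count_one_spec : Claim_equal_bitwise_count_one := by
  intro expr _ hpre
  unfold Spec_bitwise_count_one bitwise_count_one bitwise_count_one_alt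
  cases h : PySem.Int.ofStr? expr with
  | none => rfl
  | some x =>
      simp only []
      rw [pvLen_eq, Int.toNat_natCast, PySem.List.pyRange_zero_nat, pvFoldA, List.countP_map,
        pvOne_shlN expr.toList.length]
      simp only [Function.comp_def, Int.toNat_natCast, Int.one_shiftLeft]
      simpa using pvMain x expr.toList.length
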